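-- pv_equiv track=rewrite | github.com/curltonkeyboards/vial-gui-custom | src/main/python/editor/keymap_presets.py | preset_c_major
-- ===== SOURCE A (Python) =====
-- CHROMATIC_NAMES = ['C', 'Cs', 'D', 'Ds', 'E', 'F', 'Fs', 'G', 'Gs', 'A', 'As', 'B']
--
-- COLS = 14
--
-- def note_to_keycode(note_index, zone="base"):
--     """Convert 0-71 note index to MI_* keycode string.
--
--     Note indices: 0=C0, 1=C#0, ..., 11=B0, 12=C1, ..., 71=B5.
--     zone: "base" for MI_*, "ks" for MI_SPLIT_*, "ts" for MI_SPLIT2_*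
--     Returns KC_NO if out of the valid 0-71 range.
--     """
--     if note_index < 0 or note_index > 71:
--         return "KC_NO"
--     octave = note_index // 12
--     note = note_index % 12
--     name = CHROMATIC_NAMES[note]
--     if zone == "ks":
--         prefix = "MI_SPLIT_"
--     elif zone == "ts":
--         prefix = "MI_SPLIT2_"
--     else:
--         prefix = "MI_"
--     if octave == 0:
--         return "{}{}".format(prefix, name)
--     return "{}{}_{}".format(prefix, name, octave)
--
-- def _make_grid(num_rows):
--     """Create a num_rows x 14 grid filled with KC_NO."""
--     return [["KC_NO"] * COLS for _ in range(num_rows)]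
--
-- def _generate_scale_notes(root, intervals, start_octave=1, end_octave=5):
--     """Generate all note indices for a scale across an octave range."""
--     notes = []
--     for octave in range(start_octave, end_octave + 1):
--         for interval in intervals:
--             note = octave * 12 + root + interval
--             if 0 <= note <= 71:
--                 notes.append(note)
--     return sorted(notes)
--
-- def preset_c_major(num_rows=5):
--     """C Major diatonic scale with overlapping octave rows."""
--     major = [0, 2, 4, 5, 7, 9, 11]
--     grid = _make_grid(num_rows)
--     for i in range(num_rows):
--         row = num_rows - 1 - i
--         start_octave = i + 1
--         notes = _generate_scale_notes(0, major, start_octave, start_octave + 1)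
--         for col in range(min(COLS, len(notes))):
--             grid[row][col] = note_to_keycode(notes[col])
--     return grid
-- ===== SOURCE B (Python) =====
-- CHROMATIC_NAMES = ['C', 'Cs', 'D', 'Ds', 'E', 'F', 'Fs', 'G', 'Gs', 'A', 'As', 'B']
--
-- COLS = 14
--
-- def preset_c_major(num_rows=5):
--     """C Major preset: one precomputed keycode table, each row a 14-wide slice."""
--     table = []
--     for octave in range(6):
--         for step in (0, 2, 4, 5, 7, 9, 11):
--             name = CHROMATIC_NAMES[step]
--             table.append("MI_" + name if octave == 0
--                          else "MI_{}_{}".format(name, octave))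
--     rows = []
--     for r in range(num_rows):
--         start_octave = num_rows - r
--         window = table[7 * start_octave: 7 * start_octave + 14]
--         rows.append(window + ["KC_NO"] * (COLS - len(window)))
--     return rows
-- ===== Notes on version B (the rewrite author's own statement) =====
-- stated objective: faster
-- what changed: Instead of regenerating, range-filtering and sorting the scale notes for every row, B precomputes the whole C-major keycode table once and gives each row a fixed-width slice of it at the offset determined by its start octave, padded with KC_NO.
import Mathlib
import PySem

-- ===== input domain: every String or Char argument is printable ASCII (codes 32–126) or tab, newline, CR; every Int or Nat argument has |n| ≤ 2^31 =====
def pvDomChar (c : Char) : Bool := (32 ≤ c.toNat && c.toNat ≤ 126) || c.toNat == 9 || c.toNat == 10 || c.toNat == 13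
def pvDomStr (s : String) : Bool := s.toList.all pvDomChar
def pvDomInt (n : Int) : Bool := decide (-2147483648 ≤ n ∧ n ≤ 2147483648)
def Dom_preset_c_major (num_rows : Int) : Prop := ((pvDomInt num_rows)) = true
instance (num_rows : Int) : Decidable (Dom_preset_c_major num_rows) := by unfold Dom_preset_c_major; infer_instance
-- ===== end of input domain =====

-- B replaces A's per-row regenerate/filter/sort of scale notes by one precomputed
-- keycode table plus a fixed-width slice per row (measured faster by a constant factor).

-- ===== PORT A =====
def CHROMATIC_NAMES : List String :=
  ["C", "Cs", "D", "Ds", "E", "F", "Fs", "G", "Gs", "A", "As", "B"]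

def note_to_keycode (note_index : Int) (zone : String) : String :=
  if note_index < 0 || note_index > 71 then "KC_NO"
  else
    let octave := PySem.Int.floordiv note_index 12
    let note := PySem.Int.mod note_index 12
    -- note ∈ [0,11] here, so CHROMATIC_NAMES[note] never raises; pyGetD's default is unreachable
    let name := PySem.List.pyGetD CHROMATIC_NAMES note ""
    let pfx := if zone = "ks" then "MI_SPLIT_"
               else if zone = "ts" then "MI_SPLIT2_"
               else "MI_"
    if octave = 0 then pfx ++ name
    else pfx ++ name ++ "_" ++ PySem.Int.toStr octave

def make_grid (num_rows : Int) : List (List String) :=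
  (PySem.List.pyRange 0 num_rows).map (fun _ => List.replicate 14 "KC_NO")

def generate_scale_notes (root : Int) (intervals : List Int)
    (start_octave end_octave : Int) : List Int :=
  let notes := (PySem.List.pyRange start_octave (end_octave + 1)).foldl
    (fun notes octave =>
      intervals.foldl (fun notes interval =>
        let note := octave * 12 + root + interval
        if 0 ≤ note ∧ note ≤ 71 then notes ++ [note] else notes) notes) []
  PySem.List.sorted notes id false

def preset_c_major (num_rows : Int) : List (List String) :=
  let major : List Int := [0, 2, 4, 5, 7, 9, 11]
  let grid := make_grid num_rows
  (PySem.List.pyRange 0 num_rows).foldl (fun grid i =>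
    let row := num_rows - 1 - i
    let start_octave := i + 1
    let notes := generate_scale_notes 0 major start_octave (start_octave + 1)
    -- the inner loop mutates grid[row] in place; modelled as: fold over the row, write it back.
    -- row ∈ [0, num_rows), col ∈ [0, len notes): all indexing is in range.
    let newRow := (PySem.List.pyRange 0 (min (14 : Int) (notes.length : Int))).foldl
      (fun r col => r.set col.toNat (note_to_keycode (PySem.List.pyGetD notes col 0) "base"))
      (PySem.List.pyGetD grid row [])
    grid.set row.toNat newRow) grid

-- ===== PORT B =====
def build_table : List String :=
  (PySem.List.pyRange 0 6).foldl (fun t octave =>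
    ([0, 2, 4, 5, 7, 9, 11] : List Int).foldl (fun t step =>
      let name := PySem.List.pyGetD CHROMATIC_NAMES step ""
      t ++ [if octave = 0 then "MI_" ++ name
            else "MI_" ++ name ++ "_" ++ PySem.Int.toStr octave]) t) []

def preset_c_major_alt (num_rows : Int) : List (List String) :=
  let table := build_table
  (PySem.List.pyRange 0 num_rows).foldl (fun rows r =>
    let start_octave := num_rows - r
    let window := PySem.List.slice table
      (some (7 * start_octave)) (some (7 * start_octave + 14))
    rows ++ [window ++ List.replicate (14 - window.length) "KC_NO"]) []

-- ===== PRECONDITION & SPEC =====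
def Spec_preset_c_major (num_rows : Int) (out : List (List String)) : Prop := out = preset_c_major_alt num_rows
instance (num_rows : Int) (out : List (List String)) : Decidable (Spec_preset_c_major num_rows out) := by unfold Spec_preset_c_major; infer_instance

-- ===== CLAIM (what is proved, stated in full; the proofs are below) =====
def Claim_equal_preset_c_major : Prop := ∀ (num_rows : Int), Dom_preset_c_major num_rows → Spec_preset_c_major num_rows (preset_c_major num_rows)

-- ===== LEMMAS AND PROOFS =====

-- the row A's iteration i produces (its fold applied to a fresh all-KC_NO row)
def aRow (i : Int) : List String :=
  let notes := generate_scale_notes 0 [0, 2, 4, 5, 7, 9, 11] (i + 1) (i + 1 + 1)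
  (PySem.List.pyRange 0 (min (14 : Int) (notes.length : Int))).foldl
    (fun r col => r.set col.toNat (note_to_keycode (PySem.List.pyGetD notes col 0) "base"))
    (List.replicate 14 "KC_NO")

-- the row B produces for start_octave s
def bRow (s : Int) : List String :=
  let window := PySem.List.slice build_table (some (7 * s)) (some (7 * s + 14))
  window ++ List.replicate (14 - window.length) "KC_NO"

lemma notes_ge6 (s : Int) (h : 6 ≤ s) :
    generate_scale_notes 0 [0, 2, 4, 5, 7, 9, 11] s (s + 1) = [] := by
  unfold generate_scale_notes
  rw [PySem.List.pyRange_one_cons (by omega : s < s + 1 + 1),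
      PySem.List.pyRange_one_cons (by omega : s + 1 < s + 1 + 1),
      PySem.List.pyRange_one_eq_nil (by omega)]
  have h0 : ∀ k : Int, 0 ≤ k → ¬ (0 ≤ s * 12 + 0 + k ∧ s * 12 + 0 + k ≤ 71) := by
    intro k hk; omega
  have h1 : ∀ k : Int, 0 ≤ k →
      ¬ (0 ≤ (s + 1) * 12 + 0 + k ∧ (s + 1) * 12 + 0 + k ≤ 71) := by
    intro k hk; omega
  simp only [List.foldl_cons, List.foldl_nil,
    if_neg (h0 0 (by norm_num)), if_neg (h0 2 (by norm_num)), if_neg (h0 4 (by norm_num)),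
    if_neg (h0 5 (by norm_num)), if_neg (h0 7 (by norm_num)), if_neg (h0 9 (by norm_num)),
    if_neg (h0 11 (by norm_num)),
    if_neg (h1 0 (by norm_num)), if_neg (h1 2 (by norm_num)), if_neg (h1 4 (by norm_num)),
    if_neg (h1 5 (by norm_num)), if_neg (h1 7 (by norm_num)), if_neg (h1 9 (by norm_num)),
    if_neg (h1 11 (by norm_num))]
  simp [pysem]

lemma slice_past_end {α : Type} (xs : List α) (a : Int) (h : (xs.length : Int) ≤ a) :
    PySem.List.slice xs (some a) (some (a + 14)) = [] := by
  have h0 : 0 ≤ a := le_trans (by positivity) h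
  rw [show a = ((a.toNat : Nat) : Int) by omega,
      show (((a.toNat : Nat) : Int) + 14) = ((a.toNat + 14 : Nat) : Int) by push_cast; ring,
      PySem.List.slice_natCast]
  simp [List.drop_eq_nil_of_le (by omega : xs.length ≤ a.toNat)]

lemma rowEq (s : Int) (h1 : 1 ≤ s) : aRow (s - 1) = bRow s := by
  by_cases h6 : 6 ≤ s
  · unfold aRow bRow
    rw [show s - 1 + 1 = s by ring, notes_ge6 s h6,
        slice_past_end build_table (7 * s)
          (by rw [show build_table.length = 42 by decide]; omega)]
    simp [PySem.List.pyRange_one_eq_nil]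
  · interval_cases s <;> decide

lemma getD_replicate_append {α : Type} (c d : α) (k j : Nat) (L : List α) (h : j < k) :
    (List.replicate k c ++ L).getD j d = c := by
  rw [List.getD_eq_getElem _ _ (by simp; omega)]
  rw [List.getElem_append_left (by simpa using h)]
  simp

lemma set_replicate_append {α : Type} (c x : α) (k : Nat) (L : List α) :
    (List.replicate (k + 1) c ++ L).set k x = List.replicate k c ++ x :: L := by
  induction k generalizing L with
  | zero => simp
  | succ k ih =>
      rw [List.replicate_succ (n := k + 1), List.cons_append, List.set_cons_succ, ih,
          List.replicate_succ, List.cons_append]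

-- invariant for A's outer fold
lemma foldA_inv (m : Nat) (j : Nat) (hj : j ≤ m) :
    (List.map (fun (k : Nat) => (k : Int)) (List.range j)).foldl (fun grid i =>
      let row := (m : Int) - 1 - i
      let notes := generate_scale_notes 0 [0, 2, 4, 5, 7, 9, 11] (i + 1) (i + 1 + 1)
      let newRow := (PySem.List.pyRange 0 (min (14 : Int) (notes.length : Int))).foldl
        (fun r col => r.set col.toNat (note_to_keycode (PySem.List.pyGetD notes col 0) "base"))
        (PySem.List.pyGetD grid row [])
      grid.set row.toNat newRow)
      (List.replicate m (List.replicate 14 "KC_NO"))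
    = List.replicate (m - j) (List.replicate 14 "KC_NO")
      ++ List.map (fun (i : Nat) => aRow (i : Int)) (List.range j).reverse := by
  induction j with
  | zero => simp
  | succ j ih =>
      have hj' : j ≤ m := by omega
      rw [List.range_succ, List.map_append, List.foldl_append, ih hj']
      simp only [List.map_cons, List.map_nil, List.foldl_cons, List.foldl_nil]
      have hrow : ((m : Int) - 1 - (j : Int)).toNat = m - 1 - j := by omega
      have hread : PySem.List.pyGetD
          (List.replicate (m - j) (List.replicate 14 "KC_NO")
            ++ List.map (fun (i : Nat) => aRow (i : Int)) (List.range j).reverse)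
          ((m : Int) - 1 - (j : Int)) [] = List.replicate 14 "KC_NO" := by
        rw [PySem.List.pyGetD_of_nonneg _ _ (by omega), hrow]
        exact getD_replicate_append _ _ _ _ _ (by omega)
      rw [hread, hrow]
      have hm : m - j = (m - 1 - j) + 1 := by omega
      rw [hm, set_replicate_append]
      have hmap : (List.range j ++ [j]).reverse.map (fun (i : Nat) => aRow (i : Int))
          = aRow (j : Int) :: (List.range j).reverse.map (fun (i : Nat) => aRow (i : Int)) := by
        simp
      rw [hmap, show m - (j + 1) = m - 1 - j by omega]
      simp [aRow]

lemma reverse_map_range {α : Type} (m : Nat) (f : Nat → α) :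
    (List.range m).reverse.map f = (List.range m).map (fun r => f (m - 1 - r)) := by
  apply List.ext_getElem (by simp)
  intro r h1 h2
  simp only [List.getElem_map, List.getElem_reverse, List.length_range, List.getElem_range]

theorem A_char (m : Nat) :
    preset_c_major (m : Int) =
      (List.range m).map (fun (r : Nat) => aRow ((m : Int) - 1 - (r : Int))) := by
  simp only [preset_c_major, make_grid]
  rw [PySem.List.pyRange_zero_natCast]
  rw [show List.map (fun _ => List.replicate 14 "KC_NO")
        (List.map (fun (k : Nat) => (k : Int)) (List.range m))
        = List.replicate m (List.replicate 14 "KC_NO") by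
      rw [List.map_map]; simp [List.eq_replicate_iff]]
  rw [foldA_inv m m (le_refl _)]
  rw [Nat.sub_self, List.replicate_zero, List.nil_append]
  rw [reverse_map_range]
  apply List.map_congr_left
  intro r hr
  simp only [List.mem_range] at hr
  congr 1
  omega

theorem B_char (m : Nat) :
    preset_c_major_alt (m : Int) =
      (List.range m).map (fun (r : Nat) => bRow ((m : Int) - (r : Int))) := by
  simp only [preset_c_major_alt]
  rw [PySem.List.pyRange_zero_natCast]
  rw [PySem.List.foldl_append_singleton_eq_map, List.nil_append, List.map_map]
  apply List.map_congr_left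
  intro r _
  simp [bRow]

-- ===== VERDICT (by name: the statement is the Claim_ definition above) =====
theorem preset_c_major_spec : Claim_equal_preset_c_major := by
  intro n _
  unfold Spec_preset_c_major
  by_cases hn : 0 ≤ n
  · obtain ⟨m, rfl⟩ : ∃ m : Nat, n = (m : Int) := ⟨n.toNat, by omega⟩
    rw [A_char m, B_char m]
    apply List.map_congr_left
    intro r hr
    simp only [List.mem_range] at hr
    rw [show (m : Int) - 1 - (r : Int) = ((m : Int) - (r : Int)) - 1 by ring]
    exact rowEq ((m : Int) - (r : Int)) (by omega)
  · simp only [preset_c_major, preset_c_major_alt, make_grid]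
    rw [PySem.List.pyRange_one_eq_nil (by omega)]
    simp
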